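-- pv_equiv track=rewrite | github.com/Usopked/til | 자료구조/백준/Class/class5/2162.py | seg_group
-- ===== SOURCE A (Python) =====
-- def ccw(A, B, C):
--     return (B[0] - A[0]) * (C[1] - A[1]) - (B[1] - A[1]) * (C[0] - A[0])
--
-- def is_intsct(A, B, C, D):
--     if (ccw(A, B, C) * ccw(A, B, D) <= 0) and (ccw(C, D, A) * ccw(C, D, B) <= 0):
--         if (min(A[0], B[0]) <= max(C[0], D[0]) and max(A[0], B[0]) >= min(C[0], D[0]) and
--             min(A[1], B[1]) <= max(C[1], D[1]) and max(A[1], B[1]) >= min(C[1], D[1])):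
--             return True
--         return ccw(A, B, C) * ccw(A, B, D) != 0 and ccw(C, D, A) * ccw(C, D, B) != 0
--     return False
--
-- class UF:
--     def __init__(self, n):
--         self.p = [i for i in range(n)]
--         self.r = [0] * n
--         self.s = [1] * n
--
--     def find(self, x):
--         if self.p[x] != x:
--             self.p[x] = self.find(self.p[x])
--         return self.p[x]
--
--     def union(self, x, y):
--         rx = self.find(x)
--         ry = self.find(y)
--
--         if rx != ry:
--             if self.r[rx] > self.r[ry]:
--                 rx, ry = ry, rx
--             self.p[rx] = ry
--             if self.r[rx] == self.r[ry]:
--                 self.r[ry] += 1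
--             self.s[ry] += self.s[rx]
--
--     def size(self, x):
--         return self.s[self.find(x)]
--
-- def seg_group(segs):
--     n = len(segs)
--     uf = UF(n)
--
--     for i in range(n):
--         for j in range(i+1, n):
--             if is_intsct(segs[i][0], segs[i][1], segs[j][0], segs[j][1]):
--                 uf.union(i, j)
--
--     gc = len(set(uf.find(i) for i in range(n)))
--     gs = max(uf.size(i) for i in range(n))
--
--     return gc, gs
-- ===== SOURCE B (Python) =====
-- def ccw(A, B, C):
--     return (B[0] - A[0]) * (C[1] - A[1]) - (B[1] - A[1]) * (C[0] - A[0])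
--
-- def is_intsct(A, B, C, D):
--     if (ccw(A, B, C) * ccw(A, B, D) <= 0) and (ccw(C, D, A) * ccw(C, D, B) <= 0):
--         if (min(A[0], B[0]) <= max(C[0], D[0]) and max(A[0], B[0]) >= min(C[0], D[0]) and
--             min(A[1], B[1]) <= max(C[1], D[1]) and max(A[1], B[1]) >= min(C[1], D[1])):
--             return True
--         return ccw(A, B, C) * ccw(A, B, D) != 0 and ccw(C, D, A) * ccw(C, D, B) != 0
--     return False
--
-- def seg_group(segs):
--     # label-propagation instead of union-find: lab[x] is the current group label of
--     # segment x; merging two groups relabels every member of one group in one pass.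
--     n = len(segs)
--     lab = list(range(n))
--     for i in range(n):
--         for j in range(i + 1, n):
--             if is_intsct(segs[i][0], segs[i][1], segs[j][0], segs[j][1]):
--                 a, b = lab[i], lab[j]
--                 if a != b:
--                     lab = [a if v == b else v for v in lab]
--     return len(set(lab)), max(lab.count(v) for v in lab)
-- ===== Notes on version B (the rewrite author's own statement) =====
-- stated objective: alternative
-- what changed: Replaces the union-find structure (parent/rank arrays with path compression, root-set and size lookups) by a flat label array: merging two groups relabels one group's members in a single pass, and the component count and maximum size are read off the label array directly.
import Mathlib
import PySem

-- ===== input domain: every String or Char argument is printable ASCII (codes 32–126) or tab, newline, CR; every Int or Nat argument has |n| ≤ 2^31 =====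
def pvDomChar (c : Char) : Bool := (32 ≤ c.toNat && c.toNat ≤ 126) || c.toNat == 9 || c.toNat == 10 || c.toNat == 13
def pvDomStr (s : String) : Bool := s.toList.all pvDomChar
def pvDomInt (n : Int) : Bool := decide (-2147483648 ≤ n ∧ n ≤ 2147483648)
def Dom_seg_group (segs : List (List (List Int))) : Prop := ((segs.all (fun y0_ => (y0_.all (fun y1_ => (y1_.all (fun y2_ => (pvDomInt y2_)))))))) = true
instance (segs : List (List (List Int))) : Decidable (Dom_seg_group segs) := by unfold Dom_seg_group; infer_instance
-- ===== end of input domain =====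

-- B replaces A's union-find (parent/rank/size arrays, path compression) by a flat label
-- array that relabels one whole group per merge; objective: a structurally different
-- algorithm of similar cost (not claimed faster).

-- ===== PORT A =====
-- shared helpers of both Pythons (identical in Source A and Source B).
-- List accesses use pyGetD with a default; exact under Pre_ (all indices are in range there).
def pvCcw (A B C : List Int) : Int :=
  (PySem.List.pyGetD B 0 0 - PySem.List.pyGetD A 0 0) * (PySem.List.pyGetD C 1 0 - PySem.List.pyGetD A 1 0)
    - (PySem.List.pyGetD B 1 0 - PySem.List.pyGetD A 1 0) * (PySem.List.pyGetD C 0 0 - PySem.List.pyGetD A 0 0)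

def pvIsIntsct (A B C D : List Int) : Bool :=
  if pvCcw A B C * pvCcw A B D ≤ 0 ∧ pvCcw C D A * pvCcw C D B ≤ 0 then
    if min (PySem.List.pyGetD A 0 0) (PySem.List.pyGetD B 0 0) ≤ max (PySem.List.pyGetD C 0 0) (PySem.List.pyGetD D 0 0) ∧
       max (PySem.List.pyGetD A 0 0) (PySem.List.pyGetD B 0 0) ≥ min (PySem.List.pyGetD C 0 0) (PySem.List.pyGetD D 0 0) ∧
       min (PySem.List.pyGetD A 1 0) (PySem.List.pyGetD B 1 0) ≤ max (PySem.List.pyGetD C 1 0) (PySem.List.pyGetD D 1 0) ∧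
       max (PySem.List.pyGetD A 1 0) (PySem.List.pyGetD B 1 0) ≥ min (PySem.List.pyGetD C 1 0) (PySem.List.pyGetD D 1 0) then
      true
    else
      decide (pvCcw A B C * pvCcw A B D ≠ 0 ∧ pvCcw C D A * pvCcw C D B ≠ 0)
  else false

-- the four arguments segs[i][0], segs[i][1], segs[j][0], segs[j][1] of is_intsct
def pvArgs (segs : List (List (List Int))) (i j : Int) : Bool :=
  pvIsIntsct (PySem.List.pyGetD (PySem.List.pyGetD segs i []) 0 [])
             (PySem.List.pyGetD (PySem.List.pyGetD segs i []) 1 [])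
             (PySem.List.pyGetD (PySem.List.pyGetD segs j []) 0 [])
             (PySem.List.pyGetD (PySem.List.pyGetD segs j []) 1 [])

-- UF.find with path compression; the fuel argument only makes the recursion structural:
-- the parent chain is strictly rank-increasing, hence shorter than the list length,
-- so fuel = p.length is never exhausted (proved in the lemmas below).
def ufFind : Nat → List Int → Int → List Int × Int
  | 0, p, x => (p, x)
  | fuel+1, p, x =>
    if PySem.List.pyGetD p x 0 ≠ x then
      let res := ufFind fuel p (PySem.List.pyGetD p x 0)
      (PySem.List.pySetD res.1 x res.2, res.2)
    else (p, x)

def ufUnion (p r s : List Int) (x y : Int) : List Int × List Int × List Int :=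
  let f1 := ufFind p.length p x
  let p1 := f1.1
  let rx0 := f1.2
  let f2 := ufFind p1.length p1 y
  let p2 := f2.1
  let ry0 := f2.2
  if rx0 ≠ ry0 then
    let rx := if PySem.List.pyGetD r rx0 0 > PySem.List.pyGetD r ry0 0 then ry0 else rx0
    let ry := if PySem.List.pyGetD r rx0 0 > PySem.List.pyGetD r ry0 0 then rx0 else ry0
    let p3 := PySem.List.pySetD p2 rx ry
    let r' := if PySem.List.pyGetD r rx 0 = PySem.List.pyGetD r ry 0
              then PySem.List.pySetD r ry (PySem.List.pyGetD r ry 0 + 1) else r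
    let s' := PySem.List.pySetD s ry (PySem.List.pyGetD s ry 0 + PySem.List.pyGetD s rx 0)
    (p3, r', s')
  else (p2, r, s)

def seg_group (segs : List (List (List Int))) : Int × Int :=
  let n : Int := PySem.List.len segs
  let init : List Int × List Int × List Int :=
    (PySem.List.pyRange 0 n 1, PySem.List.pyRepeat [(0 : Int)] n, PySem.List.pyRepeat [(1 : Int)] n)
  let st := (PySem.List.pyRange 0 n 1).foldl (fun st i =>
      (PySem.List.pyRange (i+1) n 1).foldl (fun st j =>
        if pvArgs segs i j then ufUnion st.1 st.2.1 st.2.2 i j else st) st) init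
  -- gc = len(set(uf.find(i) for i in range(n))), threading the compressed parent list
  let gcF := (PySem.List.pyRange 0 n 1).foldl
      (fun (acc : List Int × PySem.Set Int) i =>
        let fr := ufFind acc.1.length acc.1 i
        (fr.1, PySem.Set.add acc.2 fr.2)) (st.1, PySem.Set.empty)
  -- gs = max(uf.size(i) for i in range(n)); size(i) = s[find(i)]
  let gsF := (PySem.List.pyRange 0 n 1).foldl
      (fun (acc : List Int × List Int) i =>
        let fr := ufFind acc.1.length acc.1 i
        (fr.1, acc.2 ++ [PySem.List.pyGetD st.2.2 fr.2 0])) (gcF.1, [])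
  ((PySem.Set.len gcF.2 : Int), (PySem.List.max? gsF.2 (fun v => v)).getD 0)

-- ===== PORT B =====
def seg_group_alt (segs : List (List (List Int))) : Int × Int :=
  let n : Int := PySem.List.len segs
  let lab := (PySem.List.pyRange 0 n 1).foldl (fun lab i =>
      (PySem.List.pyRange (i+1) n 1).foldl (fun lab j =>
        if pvArgs segs i j then
          let a := PySem.List.pyGetD lab i 0
          let b := PySem.List.pyGetD lab j 0
          if a ≠ b then lab.map (fun v => if v = b then a else v) else lab
        else lab) lab) (PySem.List.pyRange 0 n 1)
  ((PySem.Set.len (PySem.Set.ofList lab) : Int),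
   (PySem.List.max? (lab.map (fun v => (PySem.List.count lab v : Int))) (fun v => v)).getD 0)

-- ===== PRECONDITION & SPEC =====
-- Pre_ = exactly the inputs where the Python A returns normally: at least one segment
-- (max() over an empty generator raises ValueError) and, as soon as two segments exist
-- (only then does is_intsct index into them), every segment's first two points exist and
-- have both coordinates (otherwise an IndexError).
def Pre_seg_group (segs : List (List (List Int))) : Prop :=
  segs ≠ [] ∧ (1 < segs.length → ∀ s ∈ segs, 2 ≤ s.length ∧ ∀ pt ∈ s.take 2, 2 ≤ pt.length)
instance (segs : List (List (List Int))) : Decidable (Pre_seg_group segs) := by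
  unfold Pre_seg_group; infer_instance

def pvWitness_seg_group : List (List (List Int)) := [[[0,0],[1,1]], [[0,1],[1,0]]]

def Spec_seg_group (segs : List (List (List Int))) (out : Int × Int) : Prop := out = seg_group_alt segs
instance (segs : List (List (List Int))) (out : Int × Int) : Decidable (Spec_seg_group segs out) := by
  unfold Spec_seg_group; infer_instance

-- ===== CLAIM (what is proved, stated in full; the proofs are below) =====
def Claim_equal_seg_group : Prop := ∀ (segs : List (List (List Int))), Dom_seg_group segs → Pre_seg_group segs → Spec_seg_group segs (seg_group segs)

-- ===== LEMMAS AND PROOFS =====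

-- ---- proof-side helpers ----
def pvGet (l : List Int) (x : Int) : Int := PySem.List.pyGetD l x 0

-- pure parent-chasing (no compression), fuelled
def pvChase (p : List Int) : Nat → Int → Int
  | 0, x => x
  | f+1, x => if PySem.List.pyGetD p x 0 = x then x else pvChase p f (PySem.List.pyGetD p x 0)

def pvRoot (p : List Int) (x : Int) : Int := pvChase p p.length x

-- termination measure: how many cells have a strictly larger rank than x's
def pvMu (r : List Int) (x : Int) : Nat :=
  (List.range r.length).countP (fun (k : Nat) => decide (pvGet r x < pvGet r ((k : Nat) : Int)))

-- union-find structural invariant: in-range parents, rank strictly increasing towards the root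
def UFInv (n : Nat) (p r : List Int) : Prop :=
  p.length = n ∧ r.length = n ∧
  (∀ x : Int, 0 ≤ x → x < n →
    0 ≤ pvGet p x ∧ pvGet p x < n ∧ (pvGet p x = x ∨ pvGet r x < pvGet r (pvGet p x)))

lemma pv_countP_lt {α} (l : List α) (p q : α → Bool) (h : ∀ a ∈ l, p a = true → q a = true)
    (a : α) (ha : a ∈ l) (hqa : q a = true) (hpa : p a = false) :
    l.countP p < l.countP q := by
  induction l with
  | nil => cases ha
  | cons x xs ih =>
    rcases List.mem_cons.mp ha with rfl | ha'
    · have := List.countP_mono_left (l := xs) (p := p) (q := q)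
        (fun a ha => by simpa using h a (List.mem_cons_of_mem _ ha))
      simp [List.countP_cons, hpa, hqa]
      omega
    · have himp := fun a ha => h a (List.mem_cons_of_mem _ ha)
      have := ih himp ha'
      simp only [List.countP_cons]
      by_cases hx : p x = true
      · have := h x (List.mem_cons_self) hx
        simp [hx, this]; omega
      · simp only [Bool.not_eq_true] at hx
        simp [hx]
        split <;> omega

lemma pvMu_lt (r : List Int) (x : Int) (hx : 0 ≤ x) (hxn : x < r.length) :
    pvMu r x < r.length := by
  unfold pvMu
  have hlt : ((List.range r.length).filter
      (fun (k : Nat) => decide (pvGet r x < pvGet r ((k : Nat) : Int)))).length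
      < (List.range r.length).length := by
    apply List.length_filter_lt_length_iff_exists.mpr
    refine ⟨x.toNat, List.mem_range.mpr (by omega), ?_⟩
    simp [Int.toNat_of_nonneg hx]
  rw [List.countP_eq_length_filter]
  simpa using hlt

lemma pvMu_strict (r : List Int) (x y : Int) (hy : 0 ≤ y) (hyn : y < r.length)
    (h : pvGet r x < pvGet r y) : pvMu r y < pvMu r x := by
  unfold pvMu
  refine pv_countP_lt _ _ _ ?_ y.toNat (List.mem_range.mpr (by omega)) ?_ ?_
  · intro k _ hk
    simp only [decide_eq_true_eq] at hk ⊢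
    omega
  · simp only [decide_eq_true_eq]
    rwa [Int.toNat_of_nonneg hy]
  · simp only [decide_eq_false_iff_not, Int.toNat_of_nonneg hy]
    omega

lemma pvChase_root {n : Nat} {p r : List Int} (I : UFInv n p r) :
    ∀ (fuel : Nat) (x : Int), 0 ≤ x → x < n → pvMu r x < fuel →
      0 ≤ pvChase p fuel x ∧ pvChase p fuel x < n ∧
        pvGet p (pvChase p fuel x) = pvChase p fuel x := by
  obtain ⟨hp, hr, hinv⟩ := I
  intro fuel
  induction fuel with
  | zero => intro x hx hxn hmu; omega
  | succ f ih =>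
    intro x hx hxn hmu
    show _ ∧ _ ∧ pvGet p (if PySem.List.pyGetD p x 0 = x then x else pvChase p f (PySem.List.pyGetD p x 0)) = _
    by_cases hroot : PySem.List.pyGetD p x 0 = x
    · simp only [pvChase, hroot, if_pos rfl]
      exact ⟨hx, hxn, hroot⟩
    · obtain ⟨h1, h2, h3⟩ := hinv x hx hxn
      rcases h3 with h3 | h3
      · exact absurd h3 hroot
      · have hmu' : pvMu r (pvGet p x) < f := by
          have := pvMu_strict r x (pvGet p x) h1 (by omega) h3
          omega
        have := ih (pvGet p x) h1 h2 hmu'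
        simp only [pvChase, if_neg hroot]
        exact this

lemma pvChase_irrel {n : Nat} {p r : List Int} (I : UFInv n p r) :
    ∀ (f1 f2 : Nat) (x : Int), 0 ≤ x → x < n → pvMu r x < f1 → pvMu r x < f2 →
      pvChase p f1 x = pvChase p f2 x := by
  obtain ⟨hp, hr, hinv⟩ := I
  intro f1
  induction f1 with
  | zero => intro f2 x hx hxn h1 h2; omega
  | succ f ih =>
    intro f2 x hx hxn h1 h2
    cases f2 with
    | zero => omega
    | succ g =>
      by_cases hroot : PySem.List.pyGetD p x 0 = x
      · simp [pvChase, hroot]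
      · obtain ⟨ha, hb, hc⟩ := hinv x hx hxn
        rcases hc with hc | hc
        · exact absurd hc hroot
        · have hmu' : pvMu r (pvGet p x) < pvMu r x := pvMu_strict r x (pvGet p x) ha (by omega) hc
          simp only [pvChase, if_neg hroot]
          exact ih g (pvGet p x) ha hb (by omega) (by omega)

lemma pvRoot_spec {n : Nat} {p r : List Int} (I : UFInv n p r) (x : Int)
    (hx : 0 ≤ x) (hxn : x < n) :
    0 ≤ pvRoot p x ∧ pvRoot p x < n ∧ pvGet p (pvRoot p x) = pvRoot p x := by
  have hp := I.1
  have hr := I.2.1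
  exact pvChase_root I p.length x hx hxn (by have := pvMu_lt r x hx (by omega); omega)

lemma pvRoot_fix {n : Nat} {p r : List Int} (I : UFInv n p r) (x : Int)
    (hx : 0 ≤ x) (hxn : x < n) (h : pvGet p x = x) : pvRoot p x = x := by
  have hp := I.1
  unfold pvRoot
  have : 0 < p.length := by omega
  obtain ⟨f, hf⟩ : ∃ f, p.length = f + 1 := ⟨p.length - 1, by omega⟩
  rw [hf]
  simp [pvChase, pvGet] at h ⊢
  simp [h]

lemma pvRoot_step {n : Nat} {p r : List Int} (I : UFInv n p r) (x : Int)
    (hx : 0 ≤ x) (hxn : x < n) (h : pvGet p x ≠ x) :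
    pvRoot p x = pvRoot p (pvGet p x) := by
  have hp := I.1
  have hr := I.2.1
  obtain ⟨ha, hb, hc⟩ := I.2.2 x hx hxn
  rcases hc with hc | hc
  · exact absurd hc h
  have hmu' : pvMu r (pvGet p x) < pvMu r x := pvMu_strict r x (pvGet p x) ha (by omega) hc
  have hmux : pvMu r x < r.length := pvMu_lt r x hx (by omega)
  obtain ⟨f, hf⟩ : ∃ f, p.length = f + 1 := ⟨p.length - 1, by omega⟩
  unfold pvRoot
  conv_lhs => rw [hf]
  show (if PySem.List.pyGetD p x 0 = x then x else pvChase p f (PySem.List.pyGetD p x 0)) = _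
  rw [if_neg (show ¬(PySem.List.pyGetD p x 0 = x) from h)]
  exact pvChase_irrel I f p.length (pvGet p x) ha hb (by omega) (by omega)

lemma pvRoot_rank {n : Nat} {p r : List Int} (I : UFInv n p r) :
    ∀ (x : Int), 0 ≤ x → x < n → pvGet p x ≠ x → pvGet r x < pvGet r (pvRoot p x) := by
  intro x
  generalize hm : pvMu r x = m
  induction m using Nat.strong_induction_on generalizing x with
  | _ m ih =>
  intro hx hxn h
  obtain ⟨ha, hb, hc⟩ := I.2.2 x hx hxn
  rcases hc with hc | hc
  · exact absurd hc h
  rw [pvRoot_step I x hx hxn h]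
  by_cases h2 : pvGet p (pvGet p x) = pvGet p x
  · rw [pvRoot_fix I _ ha hb h2]; exact hc
  · have hmu' : pvMu r (pvGet p x) < m := by
      rw [← hm]; exact pvMu_strict r x (pvGet p x) ha (by have := I.2.1; omega) hc
    have := ih _ hmu' (pvGet p x) rfl ha hb h2
    omega


lemma pvGet_set (l : List Int) (x v y : Int) (hx0 : 0 ≤ x) (hx : x < l.length)
    (hy0 : 0 ≤ y) (hy : y < l.length) :
    pvGet (PySem.List.pySetD l x v) y = if y = x then v else pvGet l y := by
  rw [PySem.List.pySetD_of_nonneg l v hx0]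
  unfold pvGet
  rw [PySem.List.pyGetD_eq_getElem _ 0 (by omega) (by simpa using hy)]
  by_cases hxy : y = x
  · subst hxy
    rw [if_pos rfl, List.getElem_set_self]
  · rw [if_neg hxy, PySem.List.pyGetD_eq_getElem _ 0 hy0 (by simpa using hy),
      List.getElem_set_ne (by omega)]

lemma pvSetRoot {n : Nat} {p r : List Int} (I : UFInv n p r) (x : Int)
    (hx : 0 ≤ x) (hxn : x < n) (t : Int) (ht : t = pvRoot p x) :
    UFInv n (PySem.List.pySetD p x t) r ∧
    ∀ y : Int, 0 ≤ y → y < (n : Int) → pvRoot (PySem.List.pySetD p x t) y = pvRoot p y := by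
  obtain ⟨hp, hr, hinv⟩ := I
  have I' : UFInv n p r := ⟨hp, hr, hinv⟩
  obtain ⟨ht0, htn, htroot⟩ := ht ▸ pvRoot_spec I' x hx hxn
  have hlen2 : (PySem.List.pySetD p x t).length = p.length := PySem.List.length_pySetD ..
  have hget2 : ∀ y : Int, 0 ≤ y → y < n →
      pvGet (PySem.List.pySetD p x t) y = if y = x then t else pvGet p y := by
    intro y hy0 hy
    exact pvGet_set p x t y hx (by omega) hy0 (by omega)
  have I2 : UFInv n (PySem.List.pySetD p x t) r := by
    refine ⟨by omega, hr, ?_⟩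
    intro y hy0 hyn
    rw [hget2 y hy0 hyn]
    by_cases hyx : y = x
    · subst hyx
      rw [if_pos rfl]
      refine ⟨ht0, htn, ?_⟩
      by_cases hxx : pvGet p y = y
      · left
        rw [ht, pvRoot_fix I' y hy0 hyn hxx]
      · right
        rw [ht]
        exact pvRoot_rank I' y hy0 hyn hxx
    · rw [if_neg hyx]
      exact hinv y hy0 hyn
  refine ⟨I2, ?_⟩
  intro y
  generalize hm : pvMu r y = m
  induction m using Nat.strong_induction_on generalizing y with
  | _ m ih =>
  intro hy0 hyn
  by_cases hyx : y = x
  · subst hyx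
    by_cases hxx : pvGet p y = y
    · have htt : t = y := by rw [ht, pvRoot_fix I' y hy0 hyn hxx]
      have : pvGet (PySem.List.pySetD p y t) y = y := by
        rw [hget2 y hy0 hyn, if_pos rfl, htt]
      rw [pvRoot_fix I2 y hy0 hyn this, pvRoot_fix I' y hy0 hyn hxx]
    · have hrk : pvGet r y < pvGet r t := ht ▸ pvRoot_rank I' y hy0 hyn hxx
      have hty : t ≠ y := by intro hte; rw [hte] at hrk; omega
      have hstep : pvGet (PySem.List.pySetD p y t) y = t := by
        rw [hget2 y hy0 hyn, if_pos rfl]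
      have h1 : pvRoot (PySem.List.pySetD p y t) y
          = pvRoot (PySem.List.pySetD p y t) t := by
        have := pvRoot_step I2 y hy0 hyn (by rw [hstep]; exact hty)
        rwa [hstep] at this
      have h2 : pvGet (PySem.List.pySetD p y t) t = t := by
        rw [hget2 t ht0 htn, if_neg hty, htroot]
      rw [h1, pvRoot_fix I2 t ht0 htn h2, ht]
  · have hgy : pvGet (PySem.List.pySetD p x t) y = pvGet p y := by
      rw [hget2 y hy0 hyn, if_neg hyx]
    by_cases hyy : pvGet p y = y
    · rw [pvRoot_fix I2 y hy0 hyn (hgy ▸ hyy), pvRoot_fix I' y hy0 hyn hyy]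
    · obtain ⟨ha, hb, hc⟩ := hinv y hy0 hyn
      rcases hc with hc | hc
      · exact absurd hc hyy
      have hmu : pvMu r (pvGet p y) < m :=
        hm ▸ pvMu_strict r y (pvGet p y) ha (by omega) hc
      have h1 := pvRoot_step I2 y hy0 hyn (by rw [hgy]; exact hyy)
      rw [hgy] at h1
      rw [h1, ih _ hmu (pvGet p y) rfl ha hb, pvRoot_step I' y hy0 hyn hyy]

lemma ufFind_spec {n : Nat} {p r : List Int} (I : UFInv n p r) :
    ∀ (fuel : Nat) (x : Int), 0 ≤ x → x < n → pvMu r x < fuel →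
      (ufFind fuel p x).2 = pvRoot p x ∧
      UFInv n (ufFind fuel p x).1 r ∧
      (∀ y : Int, 0 ≤ y → y < (n : Int) → pvRoot (ufFind fuel p x).1 y = pvRoot p y) := by
  have I' := I
  obtain ⟨hp, hr, hinv⟩ := I
  intro fuel
  induction fuel with
  | zero => intro x hx hxn hmu; omega
  | succ f ih =>
    intro x hx hxn hmu
    by_cases hroot : PySem.List.pyGetD p x 0 = x
    · have : ufFind (f+1) p x = (p, x) := by
        show (if PySem.List.pyGetD p x 0 ≠ x then _ else (p, x)) = (p, x)
        rw [if_neg (by simpa using hroot)]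
      rw [this]
      exact ⟨(pvRoot_fix I' x hx hxn hroot).symm, I', fun y _ _ => rfl⟩
    · obtain ⟨ha, hb, hc⟩ := hinv x hx hxn
      rcases hc with hc | hc
      · exact absurd hc hroot
      have hmu' : pvMu r (pvGet p x) < f := by
        have := pvMu_strict r x (pvGet p x) ha (by omega) hc
        omega
      obtain ⟨ih1, ih2, ih3⟩ := ih (pvGet p x) ha hb hmu'
      have hres : ufFind (f+1) p x =
          (PySem.List.pySetD (ufFind f p (pvGet p x)).1 x (ufFind f p (pvGet p x)).2,
           (ufFind f p (pvGet p x)).2) := by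
        show (if PySem.List.pyGetD p x 0 ≠ x then _ else _) = _
        rw [if_pos (by simpa using hroot)]
        rfl
      have hval : (ufFind f p (pvGet p x)).2 = pvRoot p x := by
        rw [ih1, ← pvRoot_step I' x hx hxn hroot]
      have hval2 : (ufFind f p (pvGet p x)).2 = pvRoot (ufFind f p (pvGet p x)).1 x := by
        rw [hval, ih3 x hx hxn]
      obtain ⟨J1, J2⟩ := pvSetRoot ih2 x hx hxn _ hval2
      rw [hres]
      refine ⟨hval, J1, ?_⟩
      intro y hy0 hyn
      rw [J2 y hy0 hyn, ih3 y hy0 hyn]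

-- find as it is called in the ports: fuel = current parent-list length
lemma ufFind_run {n : Nat} {p r : List Int} (I : UFInv n p r) (x : Int)
    (hx : 0 ≤ x) (hxn : x < n) :
    (ufFind p.length p x).2 = pvRoot p x ∧
    UFInv n (ufFind p.length p x).1 r ∧
    (∀ y : Int, 0 ≤ y → y < (n : Int) → pvRoot (ufFind p.length p x).1 y = pvRoot p y) := by
  have hp := I.1
  have hr := I.2.1
  exact ufFind_spec I p.length x hx hxn (by have := pvMu_lt r x hx (by omega); omega)

lemma pvGet_map (f : Int → Int) (l : List Int) (x : Int) (hx0 : 0 ≤ x) (hx : x < l.length) :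
    pvGet (l.map f) x = f (pvGet l x) := by
  unfold pvGet
  rw [PySem.List.pyGetD_eq_getElem _ 0 hx0 (by simpa using hx),
    PySem.List.pyGetD_eq_getElem _ 0 hx0 (by simpa using hx), List.getElem_map]

lemma pv_count_relabel_a (l : List Int) (a b : Int) :
    (l.map (fun v => if v = b then a else v)).count a = l.count a + l.count b ∨
    (a = b ∧ (l.map (fun v => if v = b then a else v)).count a = l.count a) := by
  by_cases hab : a = b
  · subst hab
    right
    refine ⟨rfl, ?_⟩
    congr 1
    have h2 : List.map (fun v => if v = a then a else v) l = List.map id l :=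
      List.map_congr_left (fun v _ => by split <;> simp_all)
    rw [h2, List.map_id]
  · left
    induction l with
    | nil => simp
    | cons x xs ih =>
      simp only [List.map_cons, List.count_cons, ih]
      by_cases hxb : x = b
      · simp [hxb, hab, Ne.symm hab] <;> omega
      · by_cases hxa : x = a
        · simp [hxa, hxb, hab] <;> omega
        · simp [hxa, hxb] <;> omega

lemma pv_count_relabel_a' (l : List Int) (a b : Int) (hab : a ≠ b) :
    (l.map (fun v => if v = b then a else v)).count a = l.count a + l.count b := by
  rcases pv_count_relabel_a l a b with h | ⟨h, _⟩
  · exact h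
  · exact absurd h hab

lemma pv_count_relabel_other (l : List Int) (a b c : Int) (hca : c ≠ a) (hcb : c ≠ b) :
    (l.map (fun v => if v = b then a else v)).count c = l.count c := by
  induction l with
  | nil => simp
  | cons x xs ih =>
    simp only [List.map_cons, List.count_cons, ih]
    by_cases hxb : x = b
    · simp [hxb, Ne.symm hca, Ne.symm hcb]
    · simp [hxb]

lemma pv_collapse_eq_iff (u v c d : Int) (hcd : c ≠ d) :
    ((if u = c then d else u) = (if v = c then d else v)) ↔
      (u = v ∨ ((u = c ∨ u = d) ∧ (v = c ∨ v = d))) := by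
  by_cases hu : u = c <;> by_cases hv : v = c <;> simp [hu, hv, hcd] <;> omega

-- linking two roots: every root in the absorbed class becomes the new root
lemma pvLink {n : Nat} {p r : List Int} (I : UFInv n p r) (rx ry : Int)
    (hrx0 : 0 ≤ rx) (hrxn : rx < (n : Int)) (hry0 : 0 ≤ ry) (hryn : ry < (n : Int))
    (hrxroot : pvGet p rx = rx) (hryroot : pvGet p ry = ry) (hne : rx ≠ ry)
    {r' : List Int} (I3 : UFInv n (PySem.List.pySetD p rx ry) r') :
    ∀ z : Int, 0 ≤ z → z < (n : Int) →
      pvRoot (PySem.List.pySetD p rx ry) z = if pvRoot p z = rx then ry else pvRoot p z := by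
  have hp := I.1
  have hget3 : ∀ y : Int, 0 ≤ y → y < (n : Int) →
      pvGet (PySem.List.pySetD p rx ry) y = if y = rx then ry else pvGet p y := by
    intro y hy0 hy
    exact pvGet_set p rx ry y hrx0 (by omega) hy0 (by omega)
  intro z
  generalize hm : pvMu r' z = m
  induction m using Nat.strong_induction_on generalizing z with
  | _ m ih =>
  intro hz0 hzn
  by_cases hz : pvGet p z = z
  · by_cases hzr : z = rx
    · subst hzr
      have h1 : pvGet (PySem.List.pySetD p z ry) z = ry := by
        rw [hget3 z hz0 hzn, if_pos rfl]
      have hstep := pvRoot_step I3 z hz0 hzn (by rw [h1]; exact Ne.symm hne)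
      rw [h1] at hstep
      have h2 : pvGet (PySem.List.pySetD p z ry) ry = ry := by
        rw [hget3 ry hry0 hryn, if_neg (Ne.symm hne), hryroot]
      rw [hstep, pvRoot_fix I3 ry hry0 hryn h2, pvRoot_fix I z hz0 hzn hz, if_pos rfl]
    · have h1 : pvGet (PySem.List.pySetD p rx ry) z = z := by
        rw [hget3 z hz0 hzn, if_neg hzr]; exact hz
      rw [pvRoot_fix I3 z hz0 hzn h1, pvRoot_fix I z hz0 hzn hz, if_neg hzr]
  · have hzrx : z ≠ rx := by
      intro h; rw [h] at hz; exact hz hrxroot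
    obtain ⟨ha, hb, hc⟩ := I.2.2 z hz0 hzn
    have h1 : pvGet (PySem.List.pySetD p rx ry) z = pvGet p z := by
      rw [hget3 z hz0 hzn, if_neg hzrx]
    have hstep := pvRoot_step I3 z hz0 hzn (by rw [h1]; exact hz)
    rw [h1] at hstep
    have hznr : pvGet (PySem.List.pySetD p rx ry) z ≠ z := by rw [h1]; exact hz
    obtain ⟨ha3, hb3, hc3⟩ := I3.2.2 z hz0 hzn
    rcases hc3 with hc3 | hc3
    · exact absurd hc3 hznr
    have hmu' : pvMu r' (pvGet p z) < m := by
      rw [← hm]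
      have := pvMu_strict r' z (pvGet (PySem.List.pySetD p rx ry) z) ha3
        (by have := I3.2.1; omega) hc3
      rwa [h1] at this
    rw [hstep, ih _ hmu' (pvGet p z) rfl ha hb, pvRoot_step I z hz0 hzn hz]

def pvLabStep (lab : List Int) (i j : Int) : List Int :=
  let a := PySem.List.pyGetD lab i 0
  let b := PySem.List.pyGetD lab j 0
  if a ≠ b then lab.map (fun v => if v = b then a else v) else lab

-- the full lock-step invariant tying A's union-find state to B's label list
def FullInv (n : Nat) (p r s lab : List Int) : Prop :=
  UFInv n p r ∧ s.length = n ∧ lab.length = n ∧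
  (∀ x y : Int, 0 ≤ x → x < (n : Int) → 0 ≤ y → y < (n : Int) →
     (pvRoot p x = pvRoot p y ↔ pvGet lab x = pvGet lab y)) ∧
  (∀ x : Int, 0 ≤ x → x < (n : Int) → pvGet s (pvRoot p x) = (lab.count (pvGet lab x) : Int))

set_option maxHeartbeats 1000000 in
lemma ufUnion_merge {n : Nat} {p r s lab : List Int} (F : FullInv n p r s lab)
    (i j : Int) (hi0 : 0 ≤ i) (hin : i < (n : Int)) (hj0 : 0 ≤ j) (hjn : j < (n : Int))
    (hne : pvRoot p i ≠ pvRoot p j) (rx0 ry0 rx ry : Int)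
    (hrx0v : rx0 = pvRoot p i) (hry0v : ry0 = pvRoot p j)
    (hrxv : rx = if pvGet r rx0 > pvGet r ry0 then ry0 else rx0)
    (hryv : ry = if pvGet r rx0 > pvGet r ry0 then rx0 else ry0) :
    FullInv n (PySem.List.pySetD p rx ry)
      (if pvGet r rx = pvGet r ry then PySem.List.pySetD r ry (pvGet r ry + 1) else r)
      (PySem.List.pySetD s ry (pvGet s ry + pvGet s rx))
      (lab.map (fun v => if v = pvGet lab j then pvGet lab i else v)) := by
  obtain ⟨I, hs, hlab, K, S⟩ := F
  have hp : p.length = n := I.1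
  have hr : r.length = n := I.2.1
  obtain ⟨hrx00, hrx0n, hrx0r⟩ := hrx0v ▸ pvRoot_spec I i hi0 hin
  obtain ⟨hry00, hry0n, hry0r⟩ := hry0v ▸ pvRoot_spec I j hj0 hjn
  have hne0 : rx0 ≠ ry0 := by rw [hrx0v, hry0v]; exact hne
  have hswap : (rx = rx0 ∧ ry = ry0) ∨ (rx = ry0 ∧ ry = rx0) := by
    by_cases h : pvGet r rx0 > pvGet r ry0
    · right; rw [hrxv, hryv, if_pos h, if_pos h]; exact ⟨rfl, rfl⟩
    · left; rw [hrxv, hryv, if_neg h, if_neg h]; exact ⟨rfl, rfl⟩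
  have hnexy : rx ≠ ry := by rcases hswap with ⟨h1, h2⟩ | ⟨h1, h2⟩ <;> rw [h1, h2]
    <;> [exact hne0; exact Ne.symm hne0]
  have hrankle : pvGet r rx ≤ pvGet r ry := by
    by_cases h : pvGet r rx0 > pvGet r ry0
    · rw [hrxv, hryv, if_pos h, if_pos h]; omega
    · rw [hrxv, hryv, if_neg h, if_neg h]; omega
  have hrx0' : 0 ≤ rx ∧ rx < (n : Int) ∧ pvGet p rx = rx := by
    rcases hswap with ⟨h1, _⟩ | ⟨h1, _⟩ <;> rw [h1] <;> exact ⟨by omega, by omega, by assumption⟩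
  have hry0' : 0 ≤ ry ∧ ry < (n : Int) ∧ pvGet p ry = ry := by
    rcases hswap with ⟨_, h2⟩ | ⟨_, h2⟩ <;> rw [h2] <;> exact ⟨by omega, by omega, by assumption⟩
  obtain ⟨hrxlo, hrxhi, hrxroot⟩ := hrx0'
  obtain ⟨hrylo, hryhi, hryroot⟩ := hry0'
  set p3 := PySem.List.pySetD p rx ry with hp3
  set r' := (if pvGet r rx = pvGet r ry then PySem.List.pySetD r ry (pvGet r ry + 1) else r) with hr'
  set s' := PySem.List.pySetD s ry (pvGet s ry + pvGet s rx) with hs'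
  set a := pvGet lab i with ha
  set b := pvGet lab j with hb
  set lab' := lab.map (fun v => if v = b then a else v) with hlab'
  have hget3 : ∀ y : Int, 0 ≤ y → y < (n : Int) →
      pvGet p3 y = if y = rx then ry else pvGet p y := by
    intro y hy0 hy
    exact pvGet_set p rx ry y hrxlo (by omega) hy0 (by omega)
  have hlen3 : p3.length = n := by rw [hp3, PySem.List.length_pySetD]; exact hp
  have hlenr' : r'.length = n := by
    rw [hr']; split
    · rw [PySem.List.length_pySetD]; exact hr
    · exact hr
  have hr'_ne : ∀ y : Int, 0 ≤ y → y < (n : Int) → y ≠ ry → pvGet r' y = pvGet r y := by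
    intro y hy0 hyn hy
    rw [hr']; split
    · rw [pvGet_set r ry _ y hrylo (by omega) hy0 (by omega), if_neg hy]
    · rfl
  have hr'_ge : ∀ y : Int, 0 ≤ y → y < (n : Int) → pvGet r y ≤ pvGet r' y := by
    intro y hy0 hyn
    rw [hr']; split
    · rw [pvGet_set r ry _ y hrylo (by omega) hy0 (by omega)]
      split <;> rename_i h <;> [skip; omega]
      rw [h]; omega
    · omega
  have hr'_ry : pvGet r rx < pvGet r' ry := by
    rw [hr']; split
    · rename_i heq
      rw [pvGet_set r ry _ ry hrylo (by omega) hrylo (by omega), if_pos rfl]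
      omega
    · rename_i hneq
      omega
  have I3 : UFInv n p3 r' := by
    refine ⟨hlen3, hlenr', ?_⟩
    intro y hy0 hyn
    rw [hget3 y hy0 hyn]
    by_cases hyrx : y = rx
    · subst hyrx
      rw [if_pos rfl]
      refine ⟨hrylo, hryhi, Or.inr ?_⟩
      rw [hr'_ne y hy0 hyn hnexy]
      exact hr'_ry
    · rw [if_neg hyrx]
      obtain ⟨h1, h2, h3⟩ := I.2.2 y hy0 hyn
      refine ⟨h1, h2, ?_⟩
      rcases h3 with h3 | h3
      · exact Or.inl h3
      · right
        have hyroot : pvGet p y ≠ y := by intro hcon; rw [hcon] at h3; omega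
        have hyry : y ≠ ry := by intro hcon; rw [hcon] at hyroot; exact hyroot hryroot
        rw [hr'_ne y hy0 hyn hyry]
        calc pvGet r y < pvGet r (pvGet p y) := h3
          _ ≤ pvGet r' (pvGet p y) := hr'_ge _ h1 h2
  have roots3 : ∀ z : Int, 0 ≤ z → z < (n : Int) →
      pvRoot p3 z = if pvRoot p z = rx then ry else pvRoot p z :=
    pvLink I rx ry hrxlo hrxhi hrylo hryhi hrxroot hryroot hnexy I3
  have hab : a ≠ b := by
    intro hcon
    exact hne ((K i j hi0 hin hj0 hjn).mpr hcon)
  have hKa : ∀ z : Int, 0 ≤ z → z < (n : Int) → (pvRoot p z = rx0 ↔ pvGet lab z = a) := by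
    intro z hz0 hzn
    rw [hrx0v, ha]
    exact K z i hz0 hzn hi0 hin
  have hKb : ∀ z : Int, 0 ≤ z → z < (n : Int) → (pvRoot p z = ry0 ↔ pvGet lab z = b) := by
    intro z hz0 hzn
    rw [hry0v, hb]
    exact K z j hz0 hzn hj0 hjn
  have hlabget : ∀ z : Int, 0 ≤ z → z < (n : Int) →
      pvGet lab' z = if pvGet lab z = b then a else pvGet lab z := by
    intro z hz0 hzn
    rw [hlab']
    exact pvGet_map _ lab z hz0 (by omega)
  have hcollapse : ∀ z : Int, 0 ≤ z → z < (n : Int) →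
      pvRoot p3 z = if pvGet lab z = a ∨ pvGet lab z = b then ry else pvRoot p z := by
    intro z hz0 hzn
    rw [roots3 z hz0 hzn]
    by_cases hza : pvGet lab z = a
    · have hza' : pvRoot p z = rx0 := (hKa z hz0 hzn).mpr hza
      rw [if_pos (Or.inl hza)]
      rcases hswap with ⟨h1, h2⟩ | ⟨h1, h2⟩
      · rw [if_pos (by rw [hza', h1]), h2]
      · rw [if_neg (by rw [hza', h1]; exact hne0), hza', h2]
    · by_cases hzb : pvGet lab z = b
      · have hzb' : pvRoot p z = ry0 := (hKb z hz0 hzn).mpr hzb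
        rw [if_pos (Or.inr hzb)]
        rcases hswap with ⟨h1, h2⟩ | ⟨h1, h2⟩
        · rw [if_neg (by rw [hzb', h1]; exact Ne.symm hne0), hzb', h2]
        · rw [if_pos (by rw [hzb', h1]), h2]
      · have hnrx0 : pvRoot p z ≠ rx0 := fun hcon => hza ((hKa z hz0 hzn).mp hcon)
        have hnry0 : pvRoot p z ≠ ry0 := fun hcon => hzb ((hKb z hz0 hzn).mp hcon)
        have hnrx : pvRoot p z ≠ rx := by
          rcases hswap with ⟨h1, _⟩ | ⟨h1, _⟩ <;> rw [h1] <;> assumption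
        rw [if_neg hnrx, if_neg (show ¬(pvGet lab z = a ∨ pvGet lab z = b) from fun hcon => hcon.elim hza hzb)]
  have hryn3 : ∀ z : Int, 0 ≤ z → z < (n : Int) →
      (pvRoot p z = rx ∨ pvRoot p z = ry ↔ pvGet lab z = a ∨ pvGet lab z = b) := by
    intro z hz0 hzn
    have e1 := hKa z hz0 hzn
    have e2 := hKb z hz0 hzn
    rcases hswap with ⟨h1, h2⟩ | ⟨h1, h2⟩ <;> rw [h1, h2, e1, e2] <;> tauto
  have K3 : ∀ x y : Int, 0 ≤ x → x < (n : Int) → 0 ≤ y → y < (n : Int) →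
      (pvRoot p3 x = pvRoot p3 y ↔ pvGet lab' x = pvGet lab' y) := by
    intro x y hx0 hxn hy0 hyn
    rw [roots3 x hx0 hxn, roots3 y hy0 hyn, hlabget x hx0 hxn, hlabget y hy0 hyn,
      pv_collapse_eq_iff _ _ _ _ hnexy, pv_collapse_eq_iff _ _ _ _ (Ne.symm hab),
      K x y hx0 hxn hy0 hyn]
    rw [hryn3 x hx0 hxn, hryn3 y hy0 hyn,
      or_comm (a := pvGet lab x = a) (b := pvGet lab x = b),
      or_comm (a := pvGet lab y = a) (b := pvGet lab y = b)]
  have hcount_a : (lab'.count a : Int) = lab.count a + lab.count b := by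
    rw [hlab', pv_count_relabel_a' lab a b hab]
    push_cast
    ring
  have hsa : pvGet s rx0 = (lab.count a : Int) := by
    rw [hrx0v, ha]; exact S i hi0 hin
  have hsb : pvGet s ry0 = (lab.count b : Int) := by
    rw [hry0v, hb]; exact S j hj0 hjn
  have hs'_ry : pvGet s' ry = pvGet s ry + pvGet s rx := by
    rw [hs', pvGet_set s ry _ ry hrylo (by omega) hrylo (by omega), if_pos rfl]
  have hs'_ne : ∀ y : Int, 0 ≤ y → y < (n : Int) → y ≠ ry → pvGet s' y = pvGet s y := by
    intro y hy0 hyn hy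
    rw [hs', pvGet_set s ry _ y hrylo (by omega) hy0 (by omega), if_neg hy]
  have hsum : pvGet s ry + pvGet s rx = (lab.count a : Int) + (lab.count b : Int) := by
    rcases hswap with ⟨h1, h2⟩ | ⟨h1, h2⟩ <;> rw [h1, h2, hsa, hsb] <;> ring
  have S3 : ∀ z : Int, 0 ≤ z → z < (n : Int) →
      pvGet s' (pvRoot p3 z) = (lab'.count (pvGet lab' z) : Int) := by
    intro z hz0 hzn
    rw [hcollapse z hz0 hzn, hlabget z hz0 hzn]
    by_cases hzab : pvGet lab z = a ∨ pvGet lab z = b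
    · rw [if_pos hzab, hs'_ry, hsum]
      have hlz : (if pvGet lab z = b then a else pvGet lab z) = a := by
        rcases hzab with h | h
        · rw [h]; split <;> rfl
        · rw [if_pos h]
      rw [hlz, hcount_a]
    · obtain ⟨hza1, hzb1⟩ := not_or.mp hzab
      rw [if_neg hzab, if_neg hzb1]
      have hnrx0 : pvRoot p z ≠ rx0 := fun hcon => hza1 ((hKa z hz0 hzn).mp hcon)
      have hnry0 : pvRoot p z ≠ ry0 := fun hcon => hzb1 ((hKb z hz0 hzn).mp hcon)
      have hnry : pvRoot p z ≠ ry := by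
        rcases hswap with ⟨_, h2⟩ | ⟨_, h2⟩ <;> rw [h2] <;> assumption
      obtain ⟨hz1, hz2, _⟩ := pvRoot_spec I z hz0 hzn
      rw [hs'_ne _ hz1 hz2 hnry, S z hz0 hzn, hlab',
        pv_count_relabel_other lab a b _ hza1 hzb1]
  exact ⟨I3, by rw [hs', PySem.List.length_pySetD]; exact hs,
    by rw [hlab', List.length_map]; exact hlab, K3, S3⟩

lemma ufUnion_spec {n : Nat} {p r s lab : List Int} (F : FullInv n p r s lab)
    (i j : Int) (hi0 : 0 ≤ i) (hin : i < (n : Int)) (hj0 : 0 ≤ j) (hjn : j < (n : Int)) :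
    FullInv n (ufUnion p r s i j).1 (ufUnion p r s i j).2.1 (ufUnion p r s i j).2.2
      (pvLabStep lab i j) := by
  obtain ⟨I, hs, hlab, K, S⟩ := F
  have F' : FullInv n p r s lab := ⟨I, hs, hlab, K, S⟩
  have hp : p.length = n := I.1
  obtain ⟨hv1, I1, R1⟩ := ufFind_run I i hi0 hin
  obtain ⟨hv2, I2, R2⟩ := ufFind_run I1 j hj0 hjn
  have hRi : ∀ z : Int, 0 ≤ z → z < (n : Int) →
      pvRoot (ufFind (ufFind p.length p i).1.length (ufFind p.length p i).1 j).1 z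
        = pvRoot p z :=
    fun z hz0 hzn => (R2 z hz0 hzn).trans (R1 z hz0 hzn)
  have hv2' : (ufFind (ufFind p.length p i).1.length (ufFind p.length p i).1 j).2
      = pvRoot p j := by rw [hv2, R1 j hj0 hjn]
  have F2 : FullInv n (ufFind (ufFind p.length p i).1.length (ufFind p.length p i).1 j).1
      r s lab := by
    refine ⟨I2, hs, hlab, ?_, ?_⟩
    · intro x y hx0 hxn hy0 hyn
      rw [hRi x hx0 hxn, hRi y hy0 hyn]
      exact K x y hx0 hxn hy0 hyn
    · intro x hx0 hxn
      rw [hRi x hx0 hxn]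
      exact S x hx0 hxn
  simp only [ufUnion]
  rw [hv1, hv2']
  by_cases hnee : pvRoot p i = pvRoot p j
  · rw [if_neg (by simp [hnee])]
    have hlabeq : pvGet lab i = pvGet lab j := (K i j hi0 hin hj0 hjn).mp hnee
    have hstep : pvLabStep lab i j = lab := by
      unfold pvLabStep
      rw [if_neg (by simpa using hlabeq)]
    rw [hstep]
    exact F2
  · rw [if_pos hnee]
    have hstep : pvLabStep lab i j
        = lab.map (fun v => if v = pvGet lab j then pvGet lab i else v) := by
      unfold pvLabStep
      rw [if_pos (show ¬(PySem.List.pyGetD lab i 0 = PySem.List.pyGetD lab j 0) from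
        fun hcon => hnee ((K i j hi0 hin hj0 hjn).mpr hcon))]
      rfl
    rw [hstep]
    exact ufUnion_merge F2 i j hi0 hin hj0 hjn
      (by rw [hRi i hi0 hin, hRi j hj0 hjn]; exact hnee)
      (pvRoot p i) (pvRoot p j) _ _
      (hRi i hi0 hin).symm (hRi j hj0 hjn).symm rfl rfl

-- the common pair loop, in lock step on both representations
lemma loop_inner (segs : List (List (List Int))) {n : Nat} (i : Int)
    (hi0 : 0 ≤ i) (hin : i < (n : Int)) :
    ∀ (L : List Int) {p r s lab : List Int}, FullInv n p r s lab →
      (∀ j ∈ L, 0 ≤ j ∧ j < (n : Int)) →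
      FullInv n
        (L.foldl (fun st j => if pvArgs segs i j then ufUnion st.1 st.2.1 st.2.2 i j else st)
          (p, r, s)).1
        (L.foldl (fun st j => if pvArgs segs i j then ufUnion st.1 st.2.1 st.2.2 i j else st)
          (p, r, s)).2.1
        (L.foldl (fun st j => if pvArgs segs i j then ufUnion st.1 st.2.1 st.2.2 i j else st)
          (p, r, s)).2.2
        (L.foldl (fun lab j => if pvArgs segs i j then pvLabStep lab i j else lab) lab) := by
  intro L
  induction L with
  | nil => intro p r s lab F _; exact F
  | cons j L ih =>
    intro p r s lab F hL
    simp only [List.foldl_cons]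
    by_cases hc : pvArgs segs i j
    · rw [if_pos hc, if_pos hc]
      obtain ⟨hj0, hjn⟩ := hL j List.mem_cons_self
      have F1 := ufUnion_spec F i j hi0 hin hj0 hjn
      have hL' := fun x hx => hL x (List.mem_cons_of_mem _ hx)
      exact ih F1 hL'
    · rw [if_neg hc, if_neg hc]
      exact ih F (fun x hx => hL x (List.mem_cons_of_mem _ hx))

lemma loop_outer (segs : List (List (List Int))) {n : Nat} :
    ∀ (L : List Int) {p r s lab : List Int}, FullInv n p r s lab →
      (∀ i ∈ L, 0 ≤ i ∧ i < (n : Int)) →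
      FullInv n
        (L.foldl (fun st i =>
          (PySem.List.pyRange (i+1) (n : Int) 1).foldl
            (fun st j => if pvArgs segs i j then ufUnion st.1 st.2.1 st.2.2 i j else st) st)
          (p, r, s)).1
        (L.foldl (fun st i =>
          (PySem.List.pyRange (i+1) (n : Int) 1).foldl
            (fun st j => if pvArgs segs i j then ufUnion st.1 st.2.1 st.2.2 i j else st) st)
          (p, r, s)).2.1
        (L.foldl (fun st i =>
          (PySem.List.pyRange (i+1) (n : Int) 1).foldl
            (fun st j => if pvArgs segs i j then ufUnion st.1 st.2.1 st.2.2 i j else st) st)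
          (p, r, s)).2.2
        (L.foldl (fun lab i =>
          (PySem.List.pyRange (i+1) (n : Int) 1).foldl
            (fun lab j => if pvArgs segs i j then pvLabStep lab i j else lab) lab) lab) := by
  intro L
  induction L with
  | nil => intro p r s lab F _; exact F
  | cons i L ih =>
    intro p r s lab F hL
    simp only [List.foldl_cons]
    obtain ⟨hi0, hin⟩ := hL i List.mem_cons_self
    have F1 := loop_inner segs i hi0 hin (PySem.List.pyRange (i+1) (n : Int) 1) F
      (fun j hj => by
        have := PySem.List.mem_pyRange_one.mp hj
        exact ⟨by omega, this.2⟩)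
    exact ih F1 (fun x hx => hL x (List.mem_cons_of_mem _ hx))

lemma pvGet_range (n : Nat) (x : Int) (hx : 0 ≤ x) (hxn : x < (n : Int)) :
    pvGet (PySem.List.pyRange 0 (n : Int) 1) x = x := by
  unfold pvGet
  rw [PySem.List.pyGetD_eq_getElem _ 0 hx
    (by rw [PySem.List.length_pyRange_one]; omega)]
  rw [PySem.List.getElem_pyRange_one]
  omega

lemma pvGet_replicate (n : Nat) (c x : Int) (hx : 0 ≤ x) (hxn : x < (n : Int)) :
    pvGet (List.replicate n c) x = c := by
  unfold pvGet
  rw [PySem.List.pyGetD_eq_getElem _ 0 hx (by simpa using hxn)]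
  exact List.getElem_replicate _

lemma init_inv (n : Nat) :
    FullInv n (PySem.List.pyRange 0 (n : Int) 1)
      (PySem.List.pyRepeat [(0 : Int)] (n : Int))
      (PySem.List.pyRepeat [(1 : Int)] (n : Int))
      (PySem.List.pyRange 0 (n : Int) 1) := by
  rw [PySem.List.pyRepeat_singleton, PySem.List.pyRepeat_singleton, Int.toNat_natCast]
  have hlen : (PySem.List.pyRange 0 (n : Int) 1).length = n := by
    rw [PySem.List.length_pyRange_one]; omega
  have I : UFInv n (PySem.List.pyRange 0 (n : Int) 1) (List.replicate n 0) := by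
    refine ⟨hlen, List.length_replicate, ?_⟩
    intro x hx0 hxn
    rw [pvGet_range n x hx0 hxn]
    exact ⟨hx0, hxn, Or.inl rfl⟩
  have hroot : ∀ x : Int, 0 ≤ x → x < (n : Int) →
      pvRoot (PySem.List.pyRange 0 (n : Int) 1) x = x := by
    intro x hx0 hxn
    exact pvRoot_fix I x hx0 hxn (pvGet_range n x hx0 hxn)
  refine ⟨I, List.length_replicate, hlen, ?_, ?_⟩
  · intro x y hx0 hxn hy0 hyn
    rw [hroot x hx0 hxn, hroot y hy0 hyn, pvGet_range n x hx0 hxn, pvGet_range n y hy0 hyn]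
  · intro x hx0 hxn
    rw [hroot x hx0 hxn, pvGet_range n x hx0 hxn, pvGet_replicate n 1 x hx0 hxn]
    rw [List.count_eq_one_of_mem (PySem.List.nodup_pyRange_one 0 (n : Int))
      (PySem.List.mem_pyRange_one.mpr ⟨hx0, hxn⟩)]
    simp

-- the two read-out loops of A: each find returns the (stable) root, the parent list keeps evolving
lemma gc_fold {n : Nat} {r : List Int} (f : Int → Int) :
    ∀ (L : List Int) {p : List Int} (acc : PySem.Set Int), UFInv n p r →
      (∀ z : Int, 0 ≤ z → z < (n : Int) → pvRoot p z = f z) →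
      (∀ x ∈ L, 0 ≤ x ∧ x < (n : Int)) →
      (L.foldl (fun (acc : List Int × PySem.Set Int) i =>
          let fr := ufFind acc.1.length acc.1 i
          (fr.1, PySem.Set.add acc.2 fr.2)) (p, acc)).2
        = L.foldl (fun acc i => PySem.Set.add acc (f i)) acc ∧
      UFInv n (L.foldl (fun (acc : List Int × PySem.Set Int) i =>
          let fr := ufFind acc.1.length acc.1 i
          (fr.1, PySem.Set.add acc.2 fr.2)) (p, acc)).1 r ∧
      (∀ z : Int, 0 ≤ z → z < (n : Int) →
        pvRoot (L.foldl (fun (acc : List Int × PySem.Set Int) i =>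
          let fr := ufFind acc.1.length acc.1 i
          (fr.1, PySem.Set.add acc.2 fr.2)) (p, acc)).1 z = f z) := by
  intro L
  induction L with
  | nil => intro p acc I hf _; exact ⟨rfl, I, hf⟩
  | cons x L ih =>
    intro p acc I hf hL
    obtain ⟨hx0, hxn⟩ := hL x List.mem_cons_self
    obtain ⟨hv, I', R'⟩ := ufFind_run I x hx0 hxn
    simp only [List.foldl_cons]
    have hf' : ∀ z : Int, 0 ≤ z → z < (n : Int) →
        pvRoot (ufFind p.length p x).1 z = f z := by
      intro z hz0 hzn
      rw [R' z hz0 hzn, hf z hz0 hzn]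
    have hv' : (ufFind p.length p x).2 = f x := by rw [hv, hf x hx0 hxn]
    rw [hv']
    exact ih _ I' hf' (fun y hy => hL y (List.mem_cons_of_mem _ hy))

lemma gs_fold {n : Nat} {r : List Int} (sf : List Int) (f : Int → Int) :
    ∀ (L : List Int) {p : List Int} (out : List Int), UFInv n p r →
      (∀ z : Int, 0 ≤ z → z < (n : Int) → pvRoot p z = f z) →
      (∀ x ∈ L, 0 ≤ x ∧ x < (n : Int)) →
      (L.foldl (fun (acc : List Int × List Int) i =>
          let fr := ufFind acc.1.length acc.1 i
          (fr.1, acc.2 ++ [PySem.List.pyGetD sf fr.2 0])) (p, out)).2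
        = out ++ L.map (fun i => pvGet sf (f i)) := by
  intro L
  induction L with
  | nil => intro p out I hf _; simp
  | cons x L ih =>
    intro p out I hf hL
    obtain ⟨hx0, hxn⟩ := hL x List.mem_cons_self
    obtain ⟨hv, I', R'⟩ := ufFind_run I x hx0 hxn
    simp only [List.foldl_cons, List.map_cons]
    have hf' : ∀ z : Int, 0 ≤ z → z < (n : Int) →
        pvRoot (ufFind p.length p x).1 z = f z := by
      intro z hz0 hzn
      rw [R' z hz0 hzn, hf z hz0 hzn]
    have hv' : (ufFind p.length p x).2 = f x := by rw [hv, hf x hx0 hxn]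
    rw [hv']
    rw [ih _ I' hf' (fun y hy => hL y (List.mem_cons_of_mem _ hy))]
    show (out ++ [pvGet sf (f x)]) ++ _ = _
    rw [List.append_assoc]
    rfl

-- two lists with the same "equality kernel" have equally many distinct values
lemma set_card_eq (idx : List Int) (f g : Int → Int)
    (h : ∀ x ∈ idx, ∀ y ∈ idx, (f x = f y ↔ g x = g y)) :
    (PySem.Set.ofList (idx.map f)).length = (PySem.Set.ofList (idx.map g)).length := by
  induction idx using List.reverseRecOn with
  | nil => rfl
  | append_singleton xs x ih =>
    have h' : ∀ a ∈ xs, ∀ b ∈ xs, (f a = f b ↔ g a = g b) := by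
      intro a ha b hb
      exact h a (List.mem_append_left _ ha) b (List.mem_append_left _ hb)
    have hx := List.mem_append_right xs (List.mem_singleton.mpr (rfl : x = x))
    have hmem : f x ∈ PySem.Set.ofList (xs.map f) ↔ g x ∈ PySem.Set.ofList (xs.map g) := by
      rw [PySem.Set.mem_ofList, PySem.Set.mem_ofList, List.mem_map, List.mem_map]
      constructor
      · rintro ⟨y, hy, hfy⟩
        exact ⟨y, hy, (h y (List.mem_append_left _ hy) x hx).mp hfy⟩
      · rintro ⟨y, hy, hgy⟩
        exact ⟨y, hy, (h y (List.mem_append_left _ hy) x hx).mpr hgy⟩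
    rw [List.map_append, List.map_append, List.map_singleton, List.map_singleton,
      PySem.Set.ofList_append_singleton, PySem.Set.ofList_append_singleton]
    by_cases hmf : f x ∈ PySem.Set.ofList (xs.map f)
    · rw [PySem.Set.add_of_mem hmf, PySem.Set.add_of_mem (hmem.mp hmf)]
      exact ih h'
    · rw [PySem.Set.add_of_not_mem hmf,
        PySem.Set.add_of_not_mem (fun hcon => hmf (hmem.mpr hcon))]
      rw [List.length_append, List.length_append, ih h']
      simp

-- ===== VERDICT (by name: the statement is the Claim_ definition above) =====
theorem seg_group_spec : Claim_equal_seg_group := by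
  intro segs _ _
  show seg_group segs = seg_group_alt segs
  show
    ((PySem.Set.len
        ((PySem.List.pyRange 0 (segs.length : Int) 1).foldl
          (fun (acc : List Int × PySem.Set Int) i =>
            ((ufFind acc.1.length acc.1 i).1,
              PySem.Set.add acc.2 (ufFind acc.1.length acc.1 i).2))
          (((PySem.List.pyRange 0 (segs.length : Int) 1).foldl
              (fun st i =>
                (PySem.List.pyRange (i+1) (segs.length : Int) 1).foldl
                  (fun st j => if pvArgs segs i j then ufUnion st.1 st.2.1 st.2.2 i j else st) st)
              (PySem.List.pyRange 0 (segs.length : Int) 1,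
                PySem.List.pyRepeat [(0 : Int)] (segs.length : Int),
                PySem.List.pyRepeat [(1 : Int)] (segs.length : Int))).1,
            PySem.Set.empty)).2),
      (PySem.List.max?
        ((PySem.List.pyRange 0 (segs.length : Int) 1).foldl
          (fun (acc : List Int × List Int) i =>
            ((ufFind acc.1.length acc.1 i).1,
              acc.2 ++ [PySem.List.pyGetD
                (((PySem.List.pyRange 0 (segs.length : Int) 1).foldl
                    (fun st i =>
                      (PySem.List.pyRange (i+1) (segs.length : Int) 1).foldl
                        (fun st j => if pvArgs segs i j then ufUnion st.1 st.2.1 st.2.2 i j else st) st)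
                    (PySem.List.pyRange 0 (segs.length : Int) 1,
                      PySem.List.pyRepeat [(0 : Int)] (segs.length : Int),
                      PySem.List.pyRepeat [(1 : Int)] (segs.length : Int))).2.2)
                (ufFind acc.1.length acc.1 i).2 0]))
          (((PySem.List.pyRange 0 (segs.length : Int) 1).foldl
              (fun (acc : List Int × PySem.Set Int) i =>
                ((ufFind acc.1.length acc.1 i).1,
                  PySem.Set.add acc.2 (ufFind acc.1.length acc.1 i).2))
              (((PySem.List.pyRange 0 (segs.length : Int) 1).foldl
                  (fun st i =>
                    (PySem.List.pyRange (i+1) (segs.length : Int) 1).foldl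
                      (fun st j => if pvArgs segs i j then ufUnion st.1 st.2.1 st.2.2 i j else st) st)
                  (PySem.List.pyRange 0 (segs.length : Int) 1,
                    PySem.List.pyRepeat [(0 : Int)] (segs.length : Int),
                    PySem.List.pyRepeat [(1 : Int)] (segs.length : Int))).1,
                PySem.Set.empty)).1,
            ([] : List Int))).2
        (fun v => v)).getD 0)
    = ((PySem.Set.len (PySem.Set.ofList
        ((PySem.List.pyRange 0 (segs.length : Int) 1).foldl
          (fun lab i =>
            (PySem.List.pyRange (i+1) (segs.length : Int) 1).foldl
              (fun lab j => if pvArgs segs i j then pvLabStep lab i j else lab) lab)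
          (PySem.List.pyRange 0 (segs.length : Int) 1)))),
      (PySem.List.max?
        (((PySem.List.pyRange 0 (segs.length : Int) 1).foldl
          (fun lab i =>
            (PySem.List.pyRange (i+1) (segs.length : Int) 1).foldl
              (fun lab j => if pvArgs segs i j then pvLabStep lab i j else lab) lab)
          (PySem.List.pyRange 0 (segs.length : Int) 1)).map
            (fun v => (PySem.List.count
              ((PySem.List.pyRange 0 (segs.length : Int) 1).foldl
                (fun lab i =>
                  (PySem.List.pyRange (i+1) (segs.length : Int) 1).foldl
                    (fun lab j => if pvArgs segs i j then pvLabStep lab i j else lab) lab)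
                (PySem.List.pyRange 0 (segs.length : Int) 1)) v : Int)))
        (fun v => v)).getD 0)
  set RA := PySem.List.pyRange 0 (segs.length : Int) 1 with hRA
  set stA := RA.foldl
      (fun st i =>
        (PySem.List.pyRange (i+1) (segs.length : Int) 1).foldl
          (fun st j => if pvArgs segs i j then ufUnion st.1 st.2.1 st.2.2 i j else st) st)
      (RA, PySem.List.pyRepeat [(0 : Int)] (segs.length : Int),
        PySem.List.pyRepeat [(1 : Int)] (segs.length : Int)) with hstA
  set labf := RA.foldl
      (fun lab i =>
        (PySem.List.pyRange (i+1) (segs.length : Int) 1).foldl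
          (fun lab j => if pvArgs segs i j then pvLabStep lab i j else lab) lab) RA with hlabf
  have hmem : ∀ i ∈ RA, 0 ≤ i ∧ i < (segs.length : Int) := by
    intro i hi
    rw [hRA] at hi
    exact PySem.List.mem_pyRange_one.mp hi
  have FL := loop_outer segs RA (init_inv segs.length) hmem
  rw [← hRA, ← hstA, ← hlabf] at FL
  obtain ⟨IL, hsL, hlabL, KL, SL⟩ := FL
  obtain ⟨hgc2, Igc, Rgc⟩ := gc_fold (f := pvRoot stA.1) RA PySem.Set.empty IL
    (fun z _ _ => rfl) hmem
  have hgs2 := gs_fold stA.2.2 (pvRoot stA.1) RA ([] : List Int) Igc Rgc hmem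
  rw [hgc2, hgs2]
  rw [← PySem.Set.update_map_eq_foldl_add RA (pvRoot stA.1) PySem.Set.empty,
    PySem.Set.update_empty]
  -- the label list equals its own table of values over the index range
  have hmapg : RA.map (fun k => PySem.List.pyGetD labf k 0) = labf := by
    have h0 := PySem.List.map_pyGetD_pyRange_zero' labf 0
    rw [hlabL] at h0
    rw [hRA]
    exact h0
  have hcard : (PySem.Set.ofList (RA.map (pvRoot stA.1))).length
      = (PySem.Set.ofList labf).length := by
    rw [← hmapg]
    apply set_card_eq
    intro x hx y hy
    obtain ⟨hx0, hxn⟩ := hmem x hx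
    obtain ⟨hy0, hyn⟩ := hmem y hy
    exact KL x y hx0 hxn hy0 hyn
  have hfst : PySem.Set.len (PySem.Set.ofList (RA.map (pvRoot stA.1)))
      = PySem.Set.len (PySem.Set.ofList labf) := by
    show ((PySem.Set.ofList (RA.map (pvRoot stA.1))).length : Int)
        = ((PySem.Set.ofList labf).length : Int)
    exact_mod_cast hcard
  have hsnd : ([] : List Int) ++ RA.map (fun i => pvGet stA.2.2 (pvRoot stA.1 i))
      = labf.map (fun v => (PySem.List.count labf v : Int)) := by
    rw [List.nil_append]
    have hB := congrArg (List.map (fun v => (PySem.List.count labf v : Int))) hmapg.symm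
    rw [List.map_map] at hB
    rw [hB]
    apply List.map_congr_left
    intro i hi
    obtain ⟨hi0, hin⟩ := hmem i hi
    show pvGet stA.2.2 (pvRoot stA.1 i)
        = (PySem.List.count labf (PySem.List.pyGetD labf i 0) : Int)
    rw [PySem.List.count_eq]
    exact SL i hi0 hin
  rw [hsnd, hfst]
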